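-- pv_equiv track=rewrite | github.com/dengguojie/vue-element-admin | ops/built-in/tbe/impl/dynamic/bn_training_reduce.py | find_last_none_reduce_axis
-- ===== SOURCE A (Python) =====
-- def find_last_none_reduce_axis(shape_before_reduce, reduce_axis_index):
--     """
--     :param shape_before_reduce
--     :param reduce_axis_index
--     :return the last axis or the last serials axises that are not in reduce_axis
--     """
--     # `shape_before_reduce:(ak+1,rk,...,r2,a2,r1,a1) or (ak,rk,...,r2,a1,r1)`
--     # find a1 position, a1 may contain continues axis
--     a1_end_index = None
--     for i in range(len(shape_before_reduce) - 1, -1, -1):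
--         if i not in reduce_axis_index:
--             a1_end_index = i
--             break
--     a1_start_index = a1_end_index
--     if a1_end_index is None:
--         return a1_start_index, a1_end_index
--     for i in range(a1_end_index, -1, -1):
--         if i in reduce_axis_index:
--             a1_start_index = i + 1
--             break
--         if i == 0:
--             a1_start_index = i
--
--     return a1_start_index, a1_end_index
-- ===== SOURCE B (Python) =====
-- def find_last_none_reduce_axis(shape_before_reduce, reduce_axis_index):
--     """
--     :param shape_before_reduce
--     :param reduce_axis_index
--     :return the last axis or the last serials axises that are not in reduce_axis
--     """
--     idx = [i for i in range(len(shape_before_reduce)) if i not in reduce_axis_index]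
--     if not idx:
--         return None, None
--     end = idx[-1]
--     start = end
--     for j in reversed(idx[:-1]):
--         if j == start - 1:
--             start = j
--         else:
--             break
--     return start, end
-- ===== Notes on version B (the rewrite author's own statement) =====
-- stated objective: alternative
-- what changed: B builds the filtered list of non-reduce axis indices once and extends the last contiguous run backward over that list, instead of A's two separate backward index scans with break/flag logic.
import Mathlib
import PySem

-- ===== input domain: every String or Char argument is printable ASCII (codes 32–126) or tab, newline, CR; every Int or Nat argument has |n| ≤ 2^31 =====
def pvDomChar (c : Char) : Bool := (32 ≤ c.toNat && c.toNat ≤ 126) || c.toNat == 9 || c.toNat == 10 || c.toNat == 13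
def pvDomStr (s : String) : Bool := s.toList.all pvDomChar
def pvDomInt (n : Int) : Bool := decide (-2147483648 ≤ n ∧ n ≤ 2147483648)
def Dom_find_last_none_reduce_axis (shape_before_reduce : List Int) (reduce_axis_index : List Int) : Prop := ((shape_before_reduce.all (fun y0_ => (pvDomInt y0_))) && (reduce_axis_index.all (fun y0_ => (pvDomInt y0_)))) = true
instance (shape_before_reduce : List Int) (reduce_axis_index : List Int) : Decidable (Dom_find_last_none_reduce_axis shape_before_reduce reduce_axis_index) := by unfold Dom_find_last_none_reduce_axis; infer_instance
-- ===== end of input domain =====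

-- B builds the list of non-reduce axis indices once and extends the last contiguous run
-- backward over that list — an alternative decomposition of A's two backward index scans.

-- ===== PORT A =====
-- A's first loop: i = k, k-1, ..., 0; break with the first i not in reduce_axis_index
def flnraFindEnd (reduce_axis_index : List Int) : Nat → Option Nat
  | 0 => if reduce_axis_index.contains ((0 : Nat) : Int) then none else some 0
  | (k+1) => if reduce_axis_index.contains ((k+1 : Nat) : Int) then flnraFindEnd reduce_axis_index k else some (k+1)

-- A's second loop: i = k, ..., 0; break with i+1 at the first member, set 0 when i = 0
def flnraFindStart (reduce_axis_index : List Int) : Nat → Int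
  | 0 => if reduce_axis_index.contains ((0 : Nat) : Int) then 1 else 0
  | (k+1) => if reduce_axis_index.contains ((k+1 : Nat) : Int) then ((k : Int) + 2) else flnraFindStart reduce_axis_index k

def find_last_none_reduce_axis (shape_before_reduce : List Int) (reduce_axis_index : List Int) : Option Int × Option Int :=
  let a1_end_index : Option Nat :=
    match shape_before_reduce.length with
    | 0 => none
    | Nat.succ m => flnraFindEnd reduce_axis_index m
  match a1_end_index with
  | none => (none, none)
  | some k => (some (flnraFindStart reduce_axis_index k), some ((k : Nat) : Int))

-- ===== PORT B =====
-- walk the reversed earlier indices, extending the run while each is exactly start - 1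
def flnraWalk : List Int → Int → Int
  | [], s => s
  | j :: rest, s => if j == s - 1 then flnraWalk rest j else s

def find_last_none_reduce_axis_alt (shape_before_reduce : List Int) (reduce_axis_index : List Int) : Option Int × Option Int :=
  let idx := (PySem.List.pyRange 0 (shape_before_reduce.length : Int) 1).filter
      (fun i => !(reduce_axis_index.contains i))
  match idx.getLast? with
  | none => (none, none)
  | some e => (some (flnraWalk idx.dropLast.reverse e), some e)

-- ===== PRECONDITION & SPEC =====
def Spec_find_last_none_reduce_axis (shape_before_reduce : List Int) (reduce_axis_index : List Int) (out : Option Int × Option Int) : Prop := out = find_last_none_reduce_axis_alt shape_before_reduce reduce_axis_index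
instance (shape_before_reduce : List Int) (reduce_axis_index : List Int) (out : Option Int × Option Int) : Decidable (Spec_find_last_none_reduce_axis shape_before_reduce reduce_axis_index out) := by unfold Spec_find_last_none_reduce_axis; infer_instance

-- ===== CLAIM (what is proved, stated in full; the proofs are below) =====
def Claim_equal_find_last_none_reduce_axis : Prop := ∀ (shape_before_reduce : List Int) (reduce_axis_index : List Int), Dom_find_last_none_reduce_axis shape_before_reduce reduce_axis_index → Spec_find_last_none_reduce_axis shape_before_reduce reduce_axis_index (find_last_none_reduce_axis shape_before_reduce reduce_axis_index)

-- ===== LEMMAS AND PROOFS =====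

-- the filtered index list as a map of List.range, the form the proofs manipulate
def flnraIdx (reduce_axis_index : List Int) (n : Nat) : List Int :=
  ((List.range n).map (fun k : Nat => (k : Int))).filter (fun i => !(reduce_axis_index.contains i))

theorem flnraFindEnd_succ (reduce_axis_index : List Int) (k : Nat) :
    flnraFindEnd reduce_axis_index (k+1) =
      if reduce_axis_index.contains ((k+1 : Nat) : Int) then flnraFindEnd reduce_axis_index k
      else some (k+1) := rfl

theorem flnraFindStart_succ (reduce_axis_index : List Int) (k : Nat) :
    flnraFindStart reduce_axis_index (k+1) =
      if reduce_axis_index.contains ((k+1 : Nat) : Int) then ((k : Int) + 2)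
      else flnraFindStart reduce_axis_index k := rfl

theorem flnraContains_true (reduce_axis_index : List Int) (x : Int)
    (h : x ∈ reduce_axis_index) : reduce_axis_index.contains x = true := by
  rw [List.contains_eq_mem]; simp [h]

theorem flnraContains_false (reduce_axis_index : List Int) (x : Int)
    (h : x ∉ reduce_axis_index) : reduce_axis_index.contains x = false := by
  rw [List.contains_eq_mem]; simp [h]

theorem flnraIdx_eq_pyRange (reduce_axis_index : List Int) (n : Nat) :
    (PySem.List.pyRange 0 (n : Int) 1).filter (fun i => !(reduce_axis_index.contains i)) =
      flnraIdx reduce_axis_index n := by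
  rw [PySem.List.pyRange_one]
  unfold flnraIdx
  simp

theorem flnraIdx_succ (reduce_axis_index : List Int) (n : Nat) :
    flnraIdx reduce_axis_index (n+1) =
      flnraIdx reduce_axis_index n ++
        (if ((n : Nat) : Int) ∈ reduce_axis_index then [] else [((n : Nat) : Int)]) := by
  unfold flnraIdx
  rw [List.range_succ]
  by_cases h : ((n : Nat) : Int) ∈ reduce_axis_index <;> simp [h]

-- characterisation of A's first loop against the filtered list
theorem flnraFindEnd_spec (reduce_axis_index : List Int) (m : Nat) :
    (flnraFindEnd reduce_axis_index m = none → flnraIdx reduce_axis_index (m+1) = []) ∧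
    (∀ k, flnraFindEnd reduce_axis_index m = some k →
      ((k : Nat) : Int) ∉ reduce_axis_index ∧
      flnraIdx reduce_axis_index (m+1) = flnraIdx reduce_axis_index k ++ [((k : Nat) : Int)]) := by
  induction m with
  | zero =>
    by_cases hc : ((0 : Nat) : Int) ∈ reduce_axis_index
    · have hcc := flnraContains_true reduce_axis_index _ hc
      refine ⟨fun _ => ?_, fun k h => ?_⟩
      · rw [flnraIdx_succ]; simp [flnraIdx]; exact_mod_cast hc
      · rw [show flnraFindEnd reduce_axis_index 0 =
              if reduce_axis_index.contains ((0 : Nat) : Int) then none else some 0 from rfl,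
            hcc] at h
        simp at h
    · have hcc := flnraContains_false reduce_axis_index _ hc
      refine ⟨fun h => ?_, fun k h => ?_⟩
      · rw [show flnraFindEnd reduce_axis_index 0 =
              if reduce_axis_index.contains ((0 : Nat) : Int) then none else some 0 from rfl,
            hcc] at h
        simp at h
      · rw [show flnraFindEnd reduce_axis_index 0 =
              if reduce_axis_index.contains ((0 : Nat) : Int) then none else some 0 from rfl,
            hcc] at h
        simp only [if_false, Bool.false_eq_true, Option.some.injEq] at h
        subst h
        refine ⟨hc, ?_⟩
        rw [flnraIdx_succ]
        simp [flnraIdx]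
        exact_mod_cast hc
  | succ m ih =>
    by_cases hc : ((m+1 : Nat) : Int) ∈ reduce_axis_index
    · have hcc := flnraContains_true reduce_axis_index _ hc
      refine ⟨fun h => ?_, fun k h => ?_⟩
      · rw [flnraFindEnd_succ, hcc] at h
        rw [flnraIdx_succ]
        simp [ih.1 h]
        exact_mod_cast hc
      · rw [flnraFindEnd_succ, hcc] at h
        obtain ⟨h1, h2⟩ := ih.2 k h
        refine ⟨h1, ?_⟩
        rw [flnraIdx_succ]
        simp [h2]
        exact_mod_cast hc
    · have hcc := flnraContains_false reduce_axis_index _ hc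
      refine ⟨fun h => ?_, fun k h => ?_⟩
      · rw [flnraFindEnd_succ, hcc] at h
        simp at h
      · rw [flnraFindEnd_succ, hcc] at h
        simp only [if_false, Bool.false_eq_true, Option.some.injEq] at h
        subst h
        refine ⟨hc, ?_⟩
        rw [flnraIdx_succ]
        simp
        exact_mod_cast hc

-- every element of flnraIdx n is < n, so the walk stops immediately on too-small heads
theorem flnraIdx_lt (reduce_axis_index : List Int) (n : Nat) :
    ∀ j ∈ flnraIdx reduce_axis_index n, j < (n : Int) := by
  intro j hj
  unfold flnraIdx at hj
  obtain ⟨k, hk, rfl⟩ := by simpa using (List.mem_filter.mp hj).1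
  exact_mod_cast hk

theorem flnraWalk_stop (l : List Int) (s : Int) (h : ∀ j ∈ l, j ≠ s - 1) :
    flnraWalk l s = s := by
  cases l with
  | nil => rfl
  | cons j rest =>
    have : (j == s - 1) = false := by
      simp [h j (List.mem_cons_self ..)]
    simp [flnraWalk, this]

-- B's walk over the reversed filtered prefix equals A's second loop
theorem flnraWalk_eq_findStart (reduce_axis_index : List Int) (k : Nat)
    (hk : ((k : Nat) : Int) ∉ reduce_axis_index) :
    flnraWalk (flnraIdx reduce_axis_index k).reverse ((k : Nat) : Int) =
      flnraFindStart reduce_axis_index k := by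
  induction k with
  | zero =>
    simp [flnraIdx, flnraWalk, flnraFindStart]
    exact_mod_cast hk
  | succ k ih =>
    rw [flnraIdx_succ, flnraFindStart_succ, flnraContains_false _ _ hk]
    simp only [Bool.false_eq_true, if_false]
    by_cases hc : ((k : Nat) : Int) ∈ reduce_axis_index
    · -- k is a reduce axis: the run stops; A's loop breaks at k with k + 1
      simp only [hc, if_true, List.append_nil]
      have hstop : flnraWalk (flnraIdx reduce_axis_index k).reverse ((k+1 : Nat) : Int) =
          ((k+1 : Nat) : Int) := by
        apply flnraWalk_stop
        intro j hj
        have := flnraIdx_lt reduce_axis_index k j (by simpa using hj)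
        push_cast at this ⊢
        omega
      rw [hstop]
      cases k with
      | zero =>
        rw [show flnraFindStart reduce_axis_index 0 =
              if reduce_axis_index.contains ((0 : Nat) : Int) then 1 else 0 from rfl,
            flnraContains_true _ _ hc]
        simp
      | succ j =>
        rw [flnraFindStart_succ, flnraContains_true _ _ hc, if_pos rfl]
        push_cast
        ring
    · -- k is not a reduce axis: the run extends through k
      simp only [hc, if_false]
      rw [List.reverse_append]
      have hbeq : ((((k : Nat) : Int)) == ((k+1 : Nat) : Int) - 1) = true := by
        simp
      simp only [List.reverse_singleton, List.singleton_append, flnraWalk, hbeq, if_true]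
      exact ih hc

-- ===== VERDICT (by name: the statement is the Claim_ definition above) =====
theorem find_last_none_reduce_axis_spec : Claim_equal_find_last_none_reduce_axis := by
  intro shape_before_reduce reduce_axis_index _
  unfold Spec_find_last_none_reduce_axis find_last_none_reduce_axis find_last_none_reduce_axis_alt
  rw [flnraIdx_eq_pyRange]
  cases hn : shape_before_reduce.length with
  | zero =>
    simp [flnraIdx]
  | succ m =>
    cases he : flnraFindEnd reduce_axis_index m with
    | none =>
      have h0 := (flnraFindEnd_spec reduce_axis_index m).1 he
      simp [he, h0]
    | some k =>
      obtain ⟨hk, hsplit⟩ := (flnraFindEnd_spec reduce_axis_index m).2 k he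
      rw [hsplit]
      have hlast : (flnraIdx reduce_axis_index k ++ [((k : Nat) : Int)]).getLast? =
          some ((k : Nat) : Int) := by simp
      have hdrop : (flnraIdx reduce_axis_index k ++ [((k : Nat) : Int)]).dropLast =
          flnraIdx reduce_axis_index k := by simp
      simp only [he, hlast, hdrop]
      rw [flnraWalk_eq_findStart reduce_axis_index k hk]
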